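-- pv_equiv track=rewrite | github.com/PGiagkoulas/AdventOfCode2024 | source/d4-CeresSearch.py | _get_direction_indexes_left_end
-- ===== SOURCE A (Python) =====
-- def _get_direction_indexes_left_end(x: int, y: int, max_x: int, max_y: int, string_length: str) -> list[tuple[int, int]]:
--     step_directions = [(0, 1), (0, -1), (1, 0), (-1, 0), (1, 1), (1, -1), (-1, -1), (-1, 1)]
--
--     all_direction_indexes = [[(x + x_dir * step, y + y_dir * step) for step in range(0, string_length)] for x_dir, y_dir in step_directions]
--     valid_direction_indexes = [
--         direction
--         for direction in all_direction_indexes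
--         if all((step_x >= 0 and step_y >= 0) and (step_x < max_x and step_y < max_y) for step_x, step_y in direction)
--     ]
--     return valid_direction_indexes
-- ===== SOURCE B (Python) =====
-- def _get_direction_indexes_left_end(x: int, y: int, max_x: int, max_y: int, string_length: str) -> list[tuple[int, int]]:
--     # Endpoint-only validity: along each ray the coordinates are monotonic, so the
--     # whole ray is in bounds iff its first and last points are.
--     step_directions = [(0, 1), (0, -1), (1, 0), (-1, 0), (1, 1), (1, -1), (-1, -1), (-1, 1)]
--     valid_direction_indexes = []
--     for x_dir, y_dir in step_directions:
--         direction = [(x + x_dir * step, y + y_dir * step) for step in range(0, string_length)]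
--         if not direction:
--             valid_direction_indexes.append(direction)
--         else:
--             sx, sy = direction[0]
--             ex, ey = direction[-1]
--             if 0 <= sx < max_x and 0 <= sy < max_y and 0 <= ex < max_x and 0 <= ey < max_y:
--                 valid_direction_indexes.append(direction)
--     return valid_direction_indexes
-- ===== Notes on version B (the rewrite author's own statement) =====
-- stated objective: alternative
-- what changed: Replaces the per-direction scan of all L points with an endpoint-only in-bounds test (an empty ray is vacuously valid), justified by monotonicity of coordinates along each ray; building the 8 rays still costs O(L), so overall cost is similar.
import Mathlib
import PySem

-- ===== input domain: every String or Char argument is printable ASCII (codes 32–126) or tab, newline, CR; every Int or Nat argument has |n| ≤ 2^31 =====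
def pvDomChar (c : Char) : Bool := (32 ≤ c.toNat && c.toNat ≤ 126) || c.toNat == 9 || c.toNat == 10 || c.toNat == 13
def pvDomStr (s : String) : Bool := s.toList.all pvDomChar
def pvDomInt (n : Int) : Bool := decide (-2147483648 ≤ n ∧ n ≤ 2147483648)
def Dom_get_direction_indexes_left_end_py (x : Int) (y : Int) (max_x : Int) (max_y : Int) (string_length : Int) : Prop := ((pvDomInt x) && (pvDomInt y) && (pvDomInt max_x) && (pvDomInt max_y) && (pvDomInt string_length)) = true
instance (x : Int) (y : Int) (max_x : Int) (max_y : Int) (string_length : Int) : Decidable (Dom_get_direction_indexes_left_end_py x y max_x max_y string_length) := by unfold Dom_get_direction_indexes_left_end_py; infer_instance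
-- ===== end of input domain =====

-- B replaces A's per-direction scan of all ray points by an endpoint-only in-bounds
-- test (coordinates are monotonic along each ray; an empty ray is vacuously valid);
-- same overall cost, since building the rays still dominates.

-- ===== PORT A =====
def get_direction_indexes_left_end_py (x : Int) (y : Int) (max_x : Int) (max_y : Int) (string_length : Int) : List (List (Int × Int)) :=
  let step_directions : List (Int × Int) := [(0,1),(0,-1),(1,0),(-1,0),(1,1),(1,-1),(-1,-1),(-1,1)]
  let all_direction_indexes := step_directions.map (fun d =>
    (PySem.List.pyRange 0 string_length 1).map (fun step => (x + d.1 * step, y + d.2 * step)))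
  all_direction_indexes.filter (fun direction =>
    direction.all (fun p => (decide (p.1 ≥ 0) && decide (p.2 ≥ 0)) && (decide (p.1 < max_x) && decide (p.2 < max_y))))

-- ===== PORT B =====
def get_direction_indexes_left_end_py_alt (x : Int) (y : Int) (max_x : Int) (max_y : Int) (string_length : Int) : List (List (Int × Int)) :=
  let step_directions : List (Int × Int) := [(0,1),(0,-1),(1,0),(-1,0),(1,1),(1,-1),(-1,-1),(-1,1)]
  step_directions.foldl (fun valid d =>
    let direction := (PySem.List.pyRange 0 string_length 1).map (fun step => (x + d.1 * step, y + d.2 * step))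
    if direction.isEmpty then valid ++ [direction]
    else
      if (decide (0 ≤ (direction.headD (0,0)).1 ∧ (direction.headD (0,0)).1 < max_x) &&
          decide (0 ≤ (direction.headD (0,0)).2 ∧ (direction.headD (0,0)).2 < max_y) &&
          decide (0 ≤ (direction.getLastD (0,0)).1 ∧ (direction.getLastD (0,0)).1 < max_x) &&
          decide (0 ≤ (direction.getLastD (0,0)).2 ∧ (direction.getLastD (0,0)).2 < max_y))
      then valid ++ [direction] else valid) []

-- ===== PRECONDITION & SPEC =====
def Spec_get_direction_indexes_left_end_py (x : Int) (y : Int) (max_x : Int) (max_y : Int) (string_length : Int) (out : List (List (Int × Int))) : Prop := out = get_direction_indexes_left_end_py_alt x y max_x max_y string_length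
instance (x : Int) (y : Int) (max_x : Int) (max_y : Int) (string_length : Int) (out : List (List (Int × Int))) : Decidable (Spec_get_direction_indexes_left_end_py x y max_x max_y string_length out) := by unfold Spec_get_direction_indexes_left_end_py; infer_instance

-- ===== CLAIM (what is proved, stated in full; the proofs are below) =====
def Claim_equal_get_direction_indexes_left_end_py : Prop := ∀ (x : Int) (y : Int) (max_x : Int) (max_y : Int) (string_length : Int), Dom_get_direction_indexes_left_end_py x y max_x max_y string_length → Spec_get_direction_indexes_left_end_py x y max_x max_y string_length (get_direction_indexes_left_end_py x y max_x max_y string_length)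

-- ===== LEMMAS AND PROOFS =====

-- B's foldl-with-append loop is a filter of the mapped list.
theorem pv_foldl_two_if {α β : Type} (g : α → List β) (p : List β → Bool)
    (l : List α) (acc : List (List β)) :
    l.foldl (fun valid d =>
      if (g d).isEmpty then valid ++ [g d]
      else if p (g d) then valid ++ [g d] else valid) acc
    = acc ++ (l.map g).filter (fun v => v.isEmpty || p v) := by
  induction l generalizing acc with
  | nil => simp
  | cons a t ih =>
    rw [List.foldl_cons, List.map_cons, List.filter_cons]
    by_cases h1 : (g a).isEmpty
    · rw [if_pos h1, ih]; simp [h1]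
    · have h1' : (g a).isEmpty = false := by simpa using h1
      by_cases h2 : p (g a)
      · rw [if_neg h1, if_pos h2, ih]; simp [h1', h2]
      · rw [if_neg h1, if_neg h2, ih]; simp [h1', h2]

theorem pv_coord (x mx L s dx : Int) (hdx : dx = -1 ∨ dx = 0 ∨ dx = 1)
    (hs0 : 0 ≤ s) (hsL : s < L)
    (h0a : 0 ≤ x) (h0b : x < mx) (h1a : 0 ≤ x + dx * (L - 1)) (h1b : x + dx * (L - 1) < mx) :
    0 ≤ x + dx * s ∧ x + dx * s < mx := by
  rcases hdx with rfl | rfl | rfl <;> constructor <;> omega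

-- Along one ray, "all points in bounds" equals "both endpoints in bounds" (empty ray valid).
theorem pv_ray (x y mx my L dx dy : Int)
    (hdx : dx = -1 ∨ dx = 0 ∨ dx = 1) (hdy : dy = -1 ∨ dy = 0 ∨ dy = 1) :
    (((PySem.List.pyRange 0 L 1).map (fun s => (x + dx * s, y + dy * s))).all
      (fun p => (decide (p.1 ≥ 0) && decide (p.2 ≥ 0)) && (decide (p.1 < mx) && decide (p.2 < my))))
    = (((PySem.List.pyRange 0 L 1).map (fun s => (x + dx * s, y + dy * s))).isEmpty ||
       (decide (0 ≤ (((PySem.List.pyRange 0 L 1).map (fun s => (x + dx * s, y + dy * s))).headD (0,0)).1 ∧ (((PySem.List.pyRange 0 L 1).map (fun s => (x + dx * s, y + dy * s))).headD (0,0)).1 < mx) &&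
        decide (0 ≤ (((PySem.List.pyRange 0 L 1).map (fun s => (x + dx * s, y + dy * s))).headD (0,0)).2 ∧ (((PySem.List.pyRange 0 L 1).map (fun s => (x + dx * s, y + dy * s))).headD (0,0)).2 < my) &&
        decide (0 ≤ (((PySem.List.pyRange 0 L 1).map (fun s => (x + dx * s, y + dy * s))).getLastD (0,0)).1 ∧ (((PySem.List.pyRange 0 L 1).map (fun s => (x + dx * s, y + dy * s))).getLastD (0,0)).1 < mx) &&
        decide (0 ≤ (((PySem.List.pyRange 0 L 1).map (fun s => (x + dx * s, y + dy * s))).getLastD (0,0)).2 ∧ (((PySem.List.pyRange 0 L 1).map (fun s => (x + dx * s, y + dy * s))).getLastD (0,0)).2 < my))) := by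
  by_cases hL : L ≤ 0
  · rw [PySem.List.pyRange_one_eq_nil hL]; simp
  · replace hL : 0 < L := by omega
    have hhead : (((PySem.List.pyRange 0 L 1).map (fun s => (x + dx * s, y + dy * s))).headD (0,0)) = (x, y) := by
      rw [PySem.List.pyRange_one_cons hL]; simp
    have hsplit : PySem.List.pyRange 0 L 1 = PySem.List.pyRange 0 (L-1) 1 ++ [L-1] := by
      have h := PySem.List.pyRange_one_succ_right (a := 0) (b := L - 1) (by omega)
      have : L - 1 + 1 = L := by omega
      rw [this] at h; exact h
    have hlast : (((PySem.List.pyRange 0 L 1).map (fun s => (x + dx * s, y + dy * s))).getLastD (0,0)) = (x + dx * (L-1), y + dy * (L-1)) := by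
      rw [hsplit]; simp
    have hne : (((PySem.List.pyRange 0 L 1).map (fun s => (x + dx * s, y + dy * s))).isEmpty) = false := by
      rw [PySem.List.pyRange_one_cons hL]; simp
    rw [Bool.eq_iff_iff]
    simp only [hhead, hlast, hne, Bool.false_or, List.all_map, Function.comp,
      List.all_eq_true, PySem.List.mem_pyRange_one, Bool.and_eq_true, decide_eq_true_eq,
      and_imp, ge_iff_le]
    constructor
    · intro hall
      have h0 := hall 0 le_rfl hL
      have h1 := hall (L-1) (by omega) (by omega)
      simp only [mul_zero, add_zero] at h0
      exact ⟨⟨⟨⟨h0.1.1, h0.2.1⟩, h0.1.2, h0.2.2⟩, h1.1.1, h1.2.1⟩, h1.1.2, h1.2.2⟩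
    · rintro ⟨⟨⟨⟨h0a, h0b⟩, h0c, h0d⟩, h1a, h1b⟩, h1c, h1d⟩ s hs0 hsL
      have hx := pv_coord x mx L s dx hdx hs0 hsL h0a h0b h1a h1b
      have hy := pv_coord y my L s dy hdy hs0 hsL h0c h0d h1c h1d
      exact ⟨⟨hx.1, hy.1⟩, hx.2, hy.2⟩

-- ===== VERDICT (by name: the statement is the Claim_ definition above) =====
theorem get_direction_indexes_left_end_py_spec : Claim_equal_get_direction_indexes_left_end_py := by
  intro x y mx my L _
  unfold Spec_get_direction_indexes_left_end_py get_direction_indexes_left_end_py get_direction_indexes_left_end_py_alt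
  dsimp only
  rw [pv_foldl_two_if (g := fun d : Int × Int =>
        (PySem.List.pyRange 0 L 1).map (fun step => (x + d.1 * step, y + d.2 * step)))
      (p := fun direction : List (Int × Int) =>
        decide (0 ≤ (direction.headD (0,0)).1 ∧ (direction.headD (0,0)).1 < mx) &&
        decide (0 ≤ (direction.headD (0,0)).2 ∧ (direction.headD (0,0)).2 < my) &&
        decide (0 ≤ (direction.getLastD (0,0)).1 ∧ (direction.getLastD (0,0)).1 < mx) &&
        decide (0 ≤ (direction.getLastD (0,0)).2 ∧ (direction.getLastD (0,0)).2 < my))]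
  rw [List.nil_append]
  apply List.filter_congr
  intro v hv
  simp only [List.mem_map] at hv
  obtain ⟨d, hd, rfl⟩ := hv
  have hdx : d.1 = -1 ∨ d.1 = 0 ∨ d.1 = 1 := by fin_cases hd <;> simp
  have hdy : d.2 = -1 ∨ d.2 = 0 ∨ d.2 = 1 := by fin_cases hd <;> simp
  exact pv_ray x y mx my L d.1 d.2 hdx hdy
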